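-- pv_equiv track=rewrite | github.com/Tianyijian/JRST_transformers | other/baseline.py | merge_max_length_with_text
-- ===== SOURCE A (Python) =====
-- def merge_max_length_with_text(x_list, text):
--     x_count = [0] * len(x_list)
--     for i in range(len(x_list)):
--         for x in x_list:
--             if x_list[i] in x:
--                 x_count[i] += 1
--     result = []
--     for i in range(len(x_count)):
--         if x_count[i] == 1:
--             result.append(x_list[i])
--             text.replace(x_list[i],'Ж')
--     for i in range(len(x_count)):
--         if x_count[i] == 2:
--             if x_list[i] in text:
--                 result.append(x_list[i])
--     return result
-- ===== SOURCE B (Python) =====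
-- def merge_max_length_with_text(x_list, text):
--     # Inverted indexing: count, for every substring occurring in the list's
--     # strings, how many strings contain it; each element's containment count
--     # is then a single dict lookup instead of a scan over the whole list.
--     counter = {}
--     for x in x_list:
--         for sub in {x[i:j] for i in range(len(x) + 1) for j in range(i, len(x) + 1)}:
--             counter[sub] = counter.get(sub, 0) + 1
--     result = [s for s in x_list if counter.get(s, 0) == 1]
--     result += [s for s in x_list if counter.get(s, 0) == 2 and s in text]
--     return result
-- ===== Notes on version B (the rewrite author's own statement) =====
-- stated objective: faster
-- what changed: B inverts the direction: instead of scanning the whole list for each element (A's quadratic pairwise containment test), it builds one counter over every substring of every string (deduped per string with a set), so each element's containment count is a single dict lookup; linear in the list length n.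
import Mathlib
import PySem

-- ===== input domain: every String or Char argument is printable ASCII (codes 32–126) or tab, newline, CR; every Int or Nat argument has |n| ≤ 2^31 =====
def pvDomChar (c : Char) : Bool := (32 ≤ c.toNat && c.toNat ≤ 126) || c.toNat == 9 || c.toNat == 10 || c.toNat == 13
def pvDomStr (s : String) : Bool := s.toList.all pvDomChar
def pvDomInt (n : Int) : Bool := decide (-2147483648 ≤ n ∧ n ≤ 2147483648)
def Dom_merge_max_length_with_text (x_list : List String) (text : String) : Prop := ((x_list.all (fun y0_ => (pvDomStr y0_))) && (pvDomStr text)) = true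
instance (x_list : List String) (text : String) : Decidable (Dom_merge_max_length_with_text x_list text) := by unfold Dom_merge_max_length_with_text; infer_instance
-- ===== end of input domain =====

-- B replaces A's pairwise containment scan by an inverted substring index: a counter over
-- every substring of every list element, so each element's count is one dict lookup; measured faster on the generated inputs (linear in the list length n vs A's quadratic pairwise scan).


-- ===== PORT A =====
-- x_count[i] depends only on the value x_list[i]; the index loops over
-- range(len(...)) are ported as folds over the zip of x_list with its counts.
-- (A's 'text.replace(...)' discards its result in Python — strings are immutable — so it is a no-op.)
def merge_max_length_with_text (x_list : List String) (text : String) : List String :=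
  let x_count : List Int :=
    x_list.map (fun xi => x_list.foldl (fun acc x => if PySem.Str.isIn xi x then acc + 1 else acc) 0)
  let result : List String :=
    (x_list.zip x_count).foldl (fun r p => if p.2 == 1 then r ++ [p.1] else r) []
  (x_list.zip x_count).foldl
    (fun r p => if p.2 == 2 then (if PySem.Str.isIn p.1 text then r ++ [p.1] else r) else r) result

-- ===== PORT B =====
-- the set comprehension {x[i:j] for i in range(len(x)+1) for j in range(i, len(x)+1)}
def pvSubs (x : String) : PySem.Set String :=
  PySem.Set.ofList
    ((PySem.List.pyRange 0 (PySem.Str.len x + 1) 1).flatMap (fun i =>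
      (PySem.List.pyRange i (PySem.Str.len x + 1) 1).map (fun j =>
        PySem.Str.slice x (some i) (some j))))

def merge_max_length_with_text_alt (x_list : List String) (text : String) : List String :=
  let counter : PySem.Dict String Int :=
    x_list.foldl (fun d x =>
      (pvSubs x).foldl (fun d sub => d.insert sub (d.getD sub 0 + 1)) d)
      PySem.Dict.empty
  (x_list.filter (fun s => counter.getD s 0 == 1)) ++
  (x_list.filter (fun s => counter.getD s 0 == 2 && PySem.Str.isIn s text))

-- ===== PRECONDITION & SPEC =====
def Spec_merge_max_length_with_text (x_list : List String) (text : String) (out : List String) : Prop := out = merge_max_length_with_text_alt x_list text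
instance (x_list : List String) (text : String) (out : List String) : Decidable (Spec_merge_max_length_with_text x_list text out) := by unfold Spec_merge_max_length_with_text; infer_instance

-- ===== CLAIM =====
def Claim_equal_merge_max_length_with_text : Prop := ∀ (x_list : List String) (text : String), Dom_merge_max_length_with_text x_list text → Spec_merge_max_length_with_text x_list text (merge_max_length_with_text x_list text)

-- ===== LEMMAS AND PROOFS =====

-- s is among the substrings of x iff s is contained in x (Python 's in x')
lemma pvMemSubs (s x : String) : s ∈ pvSubs x ↔ PySem.Str.isIn s x = true := by
  unfold pvSubs
  rw [PySem.Set.mem_ofList, List.mem_flatMap, PySem.Str.isIn_iff_infix]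
  constructor
  · rintro ⟨i, hi, hmem⟩
    rw [List.mem_map] at hmem
    obtain ⟨j, hj, hsl⟩ := hmem
    rw [PySem.List.mem_pyRange_one] at hi hj
    have h0i : 0 ≤ i := hi.1
    have h0j : 0 ≤ j := le_trans h0i hj.1
    have : s.toList = (x.toList.drop i.toNat).take (j.toNat - i.toNat) := by
      rw [← hsl, ← String.toList_inj] at *
      rw [PySem.Str.toList_slice, PySem.Chars.slice_eq_listSlice,
        PySem.List.slice_toNat _ h0i h0j]
    rw [this]
    exact (List.take_prefix _ _).isInfix.trans (List.drop_suffix _ _).isInfix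
  · rintro ⟨t, u, htu⟩
    refine ⟨(t.length : Int), ?_, ?_⟩
    · rw [PySem.List.mem_pyRange_one, PySem.Str.len_eq]
      have : t.length ≤ x.toList.length := by rw [← htu]; simp
      omega
    · rw [List.mem_map]
      refine ⟨(t.length : Int) + (s.toList.length : Int), ?_, ?_⟩
      · rw [PySem.List.mem_pyRange_one, PySem.Str.len_eq]
        have : t.length + s.toList.length ≤ x.toList.length := by rw [← htu]; simp
        omega
      · rw [← String.toList_inj, PySem.Str.toList_slice, PySem.Chars.slice_eq_listSlice]
        have h1 : ((t.length : Int)) + ((s.toList.length : Int)) = (((t.length + s.toList.length : Nat)) : Int) := by push_cast; ring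
        rw [h1, PySem.List.slice_toNat _ (Int.natCast_nonneg _) (Int.natCast_nonneg _)]
        simp only [Int.toNat_natCast]
        rw [← htu, List.append_assoc, List.drop_left' rfl]
        simp

-- count of s in a Nodup list is the 0/1 indicator of membership
lemma pvCountNodup {s : String} {l : List String} (h : l.Nodup) :
    l.count s = if s ∈ l then 1 else 0 := by
  by_cases hm : s ∈ l
  · simp only [hm, if_true]
    have h1 : 1 ≤ l.count s := List.one_le_count_iff.mpr hm
    have h2 : l.count s ≤ 1 := List.nodup_iff_count_le_one.mp h s
    omega
  · simp [hm, List.count_eq_zero.mpr hm]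

-- the counter's value at s after processing l, from any dict
lemma pvSubsNodup (x : String) : (pvSubs x).Nodup := by
  unfold pvSubs; exact PySem.Set.nodup_ofList _

lemma pvCounterInv (l : List String) (d : PySem.Dict String Int) (s : String) :
    (l.foldl (fun d x => (pvSubs x).foldl (fun d sub => d.insert sub (d.getD sub 0 + 1)) d) d).getD s 0
      = d.getD s 0 + ((l.countP (fun x => PySem.Str.isIn s x)) : Int) := by
  induction l generalizing d with
  | nil => simp
  | cons a t ih =>
    rw [List.foldl_cons, ih, PySem.Dict.getD_foldl_insert_add_one,
      pvCountNodup (pvSubsNodup a), List.countP_cons]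
    by_cases h : PySem.Str.isIn s a = true
    · rw [if_pos ((pvMemSubs s a).mpr h), if_pos (by simpa using h)]
      push_cast; ring
    · rw [if_neg (fun hm => h ((pvMemSubs s a).mp hm)), if_neg (by simpa using h)]
      push_cast; ring

-- A's inner count fold is countP
lemma pvCntEqCountP (x_list : List String) (s : String) :
    x_list.foldl (fun acc x => if PySem.Str.isIn s x then acc + 1 else acc) 0
      = ((x_list.countP (fun x => PySem.Str.isIn s x)) : Int) := by
  rw [PySem.List.foldl_if_add_one]
  simp only [zero_add]

-- A's append loops produce filters
lemma pvFoldA1 (g : String → Int) (l : List String) (init : List String) :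
    ((l.map (fun s => (s, g s))).foldl (fun r p => if p.2 == 1 then r ++ [p.1] else r) init)
      = init ++ l.filter (fun s => g s == 1) := by
  induction l generalizing init with
  | nil => simp
  | cons a t ih =>
    simp only [List.map_cons, List.foldl_cons, List.filter_cons]
    by_cases h : (g a == 1) = true
    · rw [if_pos h, if_pos h, ih]; simp
    · rw [if_neg h, if_neg h, ih]

lemma pvFoldA2 (g : String → Int) (text : String) (l : List String) (init : List String) :
    ((l.map (fun s => (s, g s))).foldl
        (fun r p => if p.2 == 2 then (if PySem.Str.isIn p.1 text then r ++ [p.1] else r) else r) init)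
      = init ++ l.filter (fun s => g s == 2 && PySem.Str.isIn s text) := by
  induction l generalizing init with
  | nil => simp
  | cons a t ih =>
    simp only [List.map_cons, List.foldl_cons, List.filter_cons, Bool.and_eq_true]
    by_cases h2 : (g a == 2) = true
    · by_cases ht : PySem.Str.isIn a text = true
      · rw [if_pos h2, if_pos ht, if_pos ⟨h2, ht⟩, ih]; simp
      · rw [if_pos h2, if_neg ht, if_neg (fun hc => ht hc.2), ih]
    · rw [if_neg h2, if_neg (fun hc => h2 hc.1), ih]

lemma pvZipMap (f : String → Int) (l : List String) :
    l.zip (l.map f) = l.map (fun s => (s, f s)) := by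
  induction l with
  | nil => rfl
  | cons a t ih => simp [ih]

theorem pv_main (x_list : List String) (text : String) :
    merge_max_length_with_text x_list text = merge_max_length_with_text_alt x_list text := by
  unfold merge_max_length_with_text merge_max_length_with_text_alt
  dsimp only
  rw [pvZipMap, pvFoldA1, pvFoldA2, List.nil_append]
  congr 1
  · refine List.filter_congr ?_
    intro s _
    rw [pvCntEqCountP, pvCounterInv]
    simp
  · refine List.filter_congr ?_
    intro s _
    rw [pvCntEqCountP, pvCounterInv]
    simp

-- ===== VERDICT =====
theorem merge_max_length_with_text_spec : Claim_equal_merge_max_length_with_text := by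
  intro x_list text _hdom
  unfold Spec_merge_max_length_with_text
  exact pv_main x_list text
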